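-- pv_equiv track=rewrite | github.com/MinTuyen/DataStructure | traversals.py | row_major_traversal
-- ===== SOURCE A (Python) =====
-- def row_major_traversal (grid):
--     """traversal row"""
--     rows=len(grid)
--     cols=len(grid[0])
--     result = []
--     for r in range(rows):
--         for c in range(cols):
--             result.append((r,c))
--     return result
-- ===== SOURCE B (Python) =====
-- def row_major_traversal(grid):
--     """traversal row"""
--     width = len(grid[0])
--     out = []
--     r = len(grid)
--     while r > 0:
--         r -= 1
--         out = [(r, c) for c in range(width)] + out
--     return out
-- ===== Notes on version B (the rewrite author's own statement) =====
-- stated objective: alternative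
-- what changed: Builds the result back-to-front: a descending while loop over row indices prepends each whole row block (built by a comprehension) to the accumulator, instead of A's nested ascending loops appending pairs one by one.
import Mathlib
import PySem

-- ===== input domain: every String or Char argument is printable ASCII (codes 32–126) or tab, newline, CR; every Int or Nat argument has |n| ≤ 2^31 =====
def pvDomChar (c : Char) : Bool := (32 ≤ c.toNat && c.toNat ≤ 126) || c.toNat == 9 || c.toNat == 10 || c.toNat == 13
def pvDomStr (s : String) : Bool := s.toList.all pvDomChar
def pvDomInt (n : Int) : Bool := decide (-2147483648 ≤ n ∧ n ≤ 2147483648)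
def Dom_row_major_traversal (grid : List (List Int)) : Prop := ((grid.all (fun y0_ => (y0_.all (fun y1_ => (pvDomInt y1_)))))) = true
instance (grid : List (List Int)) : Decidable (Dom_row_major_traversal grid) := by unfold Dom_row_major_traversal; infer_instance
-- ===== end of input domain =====

-- B builds the result back-to-front: a descending loop over row indices prepends each
-- whole row block to the accumulator, instead of A's nested ascending appends; alternative decomposition, same cost.


-- ===== PORT A =====
def row_major_traversal (grid : List (List Int)) : List (Int × Int) :=
  let rows : Int := grid.length
  let cols : Int := (((PySem.List.pyGet? grid 0).getD []).length : Int)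
  (PySem.List.pyRange 0 rows 1).foldl
    (fun result r =>
      (PySem.List.pyRange 0 cols 1).foldl (fun result c => result ++ [(r, c)]) result)
    []

-- ===== PORT B =====
-- the descending 'while r > 0: r -= 1; out = rowblock(r) + out' loop, as structural recursion on r
def pvAltLoop (width : Int) : Nat → List (Int × Int) → List (Int × Int)
  | 0, out => out
  | Nat.succ n, out =>
      pvAltLoop width n (((PySem.List.pyRange 0 width 1).map (fun c => ((n : Int), c))) ++ out)

def row_major_traversal_alt (grid : List (List Int)) : List (Int × Int) :=
  let width : Int := (((PySem.List.pyGet? grid 0).getD []).length : Int)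
  pvAltLoop width grid.length []

-- ===== PRECONDITION & SPEC =====
-- Pre_ excludes only the empty grid, on which A's 'grid[0]' raises IndexError.
def Pre_row_major_traversal (grid : List (List Int)) : Prop := grid ≠ []
instance (grid : List (List Int)) : Decidable (Pre_row_major_traversal grid) := by unfold Pre_row_major_traversal; infer_instance
def pvWitness_row_major_traversal : List (List Int) := [[1, 2], [3, 4]]

def Spec_row_major_traversal (grid : List (List Int)) (out : List (Int × Int)) : Prop := out = row_major_traversal_alt grid
instance (grid : List (List Int)) (out : List (Int × Int)) : Decidable (Spec_row_major_traversal grid out) := by unfold Spec_row_major_traversal; infer_instance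

-- ===== CLAIM (what is proved, stated in full; the proofs are below) =====
def Claim_equal_row_major_traversal : Prop := ∀ (grid : List (List Int)), Dom_row_major_traversal grid → Pre_row_major_traversal grid → Spec_row_major_traversal grid (row_major_traversal grid)

-- ===== LEMMAS AND PROOFS =====

-- B's descending prepend-loop unfolds to the row-major flatMap followed by the accumulator.
theorem pvAltLoop_eq (width : Int) (n : Nat) (out : List (Int × Int)) :
    pvAltLoop width n out
      = (List.range n).flatMap
          (fun r => (PySem.List.pyRange 0 width 1).map (fun c => ((r : Int), c))) ++ out := by
  induction n generalizing out with
  | zero => simp [pvAltLoop]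
  | succ n ih =>
    rw [pvAltLoop, ih, List.range_succ]
    simp

-- flatMap through the singleton-cast flatMap collapses to one flatMap over the Nat list.
theorem pv_flat_single {b : Type} (f : Int → List b) (l : List Nat) :
    List.flatMap f (List.flatMap (fun a : Nat => [(a : Int)]) l)
      = List.flatMap (fun a : Nat => f (a : Int)) l := by
  induction l with
  | nil => rfl
  | cons x xs ih => simp [List.flatMap_cons, ih]

-- ===== VERDICT (by name: the statement is the Claim_ definition above) =====
theorem row_major_traversal_spec : Claim_equal_row_major_traversal := by
  intro grid _ _
  unfold Spec_row_major_traversal row_major_traversal row_major_traversal_alt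
  simp only
  have hcongr : ∀ (acc : List (Int × Int)) (r : Int),
      r ∈ PySem.List.pyRange 0 (grid.length : Int) 1 →
      (PySem.List.pyRange 0 ((((PySem.List.pyGet? grid 0).getD []).length : Int)) 1).foldl
          (fun result c => result ++ [(r, c)]) acc
        = acc ++ (PySem.List.pyRange 0 ((((PySem.List.pyGet? grid 0).getD []).length : Int)) 1).map
            (fun c => (r, c)) := by
    intro acc r _
    exact PySem.List.foldl_append_singleton_eq_map _ _ _
  rw [PySem.List.foldl_congr_mem _ _ _ _ hcongr,
      PySem.List.foldl_append_eq_flatMap]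
  rw [pvAltLoop_eq]
  simp only [List.nil_append, List.append_nil]
  simp [PySem.List.pyRange_one, List.flatMap_map]
  rw [pv_flat_single]
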